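-- pv_equiv track=rewrite | github.com/INK-USC/expl-refinement | matcher/utils.py | fill_whitespace_in_quote
-- ===== SOURCE A (Python) =====
-- SPECIAL_CHARS = {' ': '_', '(': '[LEFT_BRACKET]', ')': '[RIGHT_BRACKET]', '.': '[DOT]', ',': '[COMMA]', '!': '[EX]'}
--
-- def fill_whitespace_in_quote(sentence):
--     """input: a string containing multiple sentences;
--     output: fill all whitespaces in a quotation mark into underscore"""
--
--     def convert_special_chars(s, flag):
--         return SPECIAL_CHARS[s] if s in SPECIAL_CHARS and flag else s
--
--     flag = False  # whether space should be turned into underscore, currently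
--     output_sentence = ''
--     for i in range(len(sentence)):
--         if sentence[i] == "\"":
--             flag = not flag  # flip the flag if a quote mark appears
--         output_sentence += convert_special_chars(sentence[i], flag)
--     return output_sentence
-- ===== SOURCE B (Python) =====
-- SPECIAL_CHARS = {' ': '_', '(': '[LEFT_BRACKET]', ')': '[RIGHT_BRACKET]', '.': '[DOT]', ',': '[COMMA]', '!': '[EX]'}
--
-- _TABLE = str.maketrans(SPECIAL_CHARS)
--
-- def fill_whitespace_in_quote(sentence):
--     segments = sentence.split('"')
--     return '"'.join(seg.translate(_TABLE) if i % 2 == 1 else seg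
--                     for i, seg in enumerate(segments))
-- ===== Notes on version B (the rewrite author's own statement) =====
-- stated objective: faster
-- what changed: Replaces the char-by-char scan with a mutable in/out flag and quadratic string concatenation by splitting on the quote character, translating only the odd-indexed (inside-quote) segments with str.translate, and rejoining with the quote character.
import Mathlib
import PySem

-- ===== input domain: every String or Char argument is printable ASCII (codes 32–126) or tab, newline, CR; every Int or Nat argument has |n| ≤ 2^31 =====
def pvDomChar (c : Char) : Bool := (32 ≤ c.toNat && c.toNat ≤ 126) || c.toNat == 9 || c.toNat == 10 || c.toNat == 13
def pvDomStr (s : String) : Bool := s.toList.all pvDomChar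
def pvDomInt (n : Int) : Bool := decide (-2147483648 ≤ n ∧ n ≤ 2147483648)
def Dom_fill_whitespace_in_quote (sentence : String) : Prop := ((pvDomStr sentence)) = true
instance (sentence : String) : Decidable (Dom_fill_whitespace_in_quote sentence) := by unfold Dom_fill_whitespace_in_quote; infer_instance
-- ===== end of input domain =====

-- B replaces A's char-by-char flag scan by split-on-quote / translate odd segments / rejoin (idiomatic decomposition, same results).

-- shared module constant (Python's SPECIAL_CHARS dict, as an association list)
def SPECIAL_CHARS : List (Char × List Char) :=
  [(' ', ['_']), ('(', "[LEFT_BRACKET]".toList), (')', "[RIGHT_BRACKET]".toList),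
   ('.', "[DOT]".toList), (',', "[COMMA]".toList), ('!', "[EX]".toList)]

-- ===== PORT A =====
-- `SPECIAL_CHARS[s] if s in SPECIAL_CHARS and flag else s`
def convert_special_chars (s : Char) (flag : Bool) : List Char :=
  match SPECIAL_CHARS.lookup s with
  | some v => if flag then v else [s]
  | none => [s]

-- one iteration of A's loop body over the state (flag, output_sentence)
def fillStepA (st : Bool × List Char) (c : Char) : Bool × List Char :=
  let flag := if c = '"' then !st.1 else st.1
  (flag, st.2 ++ convert_special_chars c flag)

def fill_whitespace_in_quote (sentence : String) : String :=
  String.ofList (sentence.toList.foldl fillStepA (false, [])).2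

-- ===== PORT B =====
-- per-character translation table lookup (str.translate with _TABLE)
def transChar (c : Char) : List Char := (SPECIAL_CHARS.lookup c).getD [c]

def fill_whitespace_in_quote_alt (sentence : String) : String :=
  String.ofList (List.intercalate ['"']
    ((sentence.toList.splitOn '"').mapIdx
      (fun i seg => if i % 2 = 1 then seg.flatMap transChar else seg)))

-- ===== PRECONDITION & SPEC =====
def Spec_fill_whitespace_in_quote (sentence : String) (out : String) : Prop := out = fill_whitespace_in_quote_alt sentence
instance (sentence : String) (out : String) : Decidable (Spec_fill_whitespace_in_quote sentence out) := by unfold Spec_fill_whitespace_in_quote; infer_instance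

-- ===== CLAIM (what is proved, stated in full; the proofs are below) =====
def Claim_equal_fill_whitespace_in_quote : Prop := ∀ (sentence : String), Dom_fill_whitespace_in_quote sentence → Spec_fill_whitespace_in_quote sentence (fill_whitespace_in_quote sentence)

-- ===== LEMMAS AND PROOFS =====

-- recursive characterization of A's loop output from a given flag
def outA : Bool → List Char → List Char
  | _, [] => []
  | b, c :: cs =>
    let b' := if c = '"' then !b else b
    convert_special_chars c b' ++ outA b' cs

theorem foldl_fillStepA (cs : List Char) (b : Bool) (acc : List Char) :
    (cs.foldl fillStepA (b, acc)).2 = acc ++ outA b cs := by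
  induction cs generalizing b acc with
  | nil => simp [outA]
  | cons c cs ih =>
    simp only [List.foldl_cons, fillStepA, outA]
    rw [ih]
    simp [List.append_assoc]

theorem intercalate_cons_prefix (sep p x : List Char) (xs : List (List Char)) :
    List.intercalate sep ((p ++ x) :: xs) = p ++ List.intercalate sep (x :: xs) := by
  cases xs <;> simp [List.intercalate, List.append_assoc]

-- the core correspondence: A's flagged scan = B's split/translate/join, for any starting parity
theorem outA_eq_split (cs : List Char) (b : Bool) :
    outA b cs = List.intercalate ['"']
      ((cs.splitOn '"').mapIdx
        (fun i seg => if (i + cond b 1 0) % 2 = 1 then seg.flatMap transChar else seg)) := by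
  induction cs generalizing b with
  | nil =>
    simp [outA, List.splitOn, List.splitOnP_nil, List.intercalate]
  | cons c cs ih =>
    by_cases hc : c = '"'
    · subst hc
      have hsplit : (('"' :: cs).splitOn '"') = [] :: cs.splitOn '"' := by
        simp [List.splitOn, List.splitOnP_cons]
      rw [hsplit]
      rw [List.mapIdx_cons]
      have hhead : (if (0 + cond b 1 0) % 2 = 1 then ([] : List Char).flatMap transChar else []) = [] := by
        split <;> simp
      rw [hhead]
      have hne : (cs.splitOn '"').mapIdx
          (fun i seg => if (i + 1 + cond b 1 0) % 2 = 1 then seg.flatMap transChar else seg) ≠ [] := by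
        simp [List.splitOn]
        exact List.splitOnP_ne_nil _ _
      obtain ⟨y, ys, hy⟩ := List.exists_cons_of_ne_nil hne
      have hfun : (fun (i : Nat) (seg : List Char) => if (i + 1 + cond b 1 0) % 2 = 1 then seg.flatMap transChar else seg)
          = (fun (i : Nat) (seg : List Char) => if (i + cond (!b) 1 0) % 2 = 1 then seg.flatMap transChar else seg) := by
        funext i seg
        have h : (i + 1 + cond b 1 0) % 2 = (i + cond (!b) 1 0) % 2 := by
          cases b
          · simp
          · simp only [Bool.not_true, cond_true, cond_false]
            omega
        rw [h]
      rw [hy]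
      have hstep : List.intercalate ['"'] (([] : List Char) :: y :: ys) = '"' :: List.intercalate ['"'] (y :: ys) := by
        simp [List.intercalate]
      rw [hstep, ← hy, hfun, ← ih (!b)]
      simp [outA, convert_special_chars, SPECIAL_CHARS, List.lookup]
    · have hsplit : ((c :: cs).splitOn '"') = List.modifyHead (c :: ·) (cs.splitOn '"') := by
        simp [List.splitOn, List.splitOnP_cons, hc]
      rw [hsplit]
      obtain ⟨s0, rest, hs⟩ := List.exists_cons_of_ne_nil (by
        simp [List.splitOn]; exact List.splitOnP_ne_nil _ _ : (cs.splitOn '"') ≠ [])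
      rw [hs]
      simp only [List.modifyHead, List.mapIdx_cons]
      have houtA : outA b (c :: cs) = convert_special_chars c b ++ outA b cs := by
        simp [outA, hc]
      rw [houtA, ih b, hs, List.mapIdx_cons]
      have hcb : ∀ x : List Char, (if (0 + cond b 1 0) % 2 = 1 then x.flatMap transChar else x)
          = if b then x.flatMap transChar else x := by
        intro x; cases b <;> simp
      rw [hcb, hcb]
      have hhead : (if b then (c :: s0).flatMap transChar else c :: s0)
          = convert_special_chars c b ++ (if b then s0.flatMap transChar else s0) := by
        cases b
        · simp only [convert_special_chars, Bool.false_eq_true, if_false]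
          cases List.lookup c SPECIAL_CHARS <;> simp
        · simp only [convert_special_chars, transChar, if_true, List.flatMap_cons]
          cases List.lookup c SPECIAL_CHARS <;> simp
      rw [hhead]
      exact (intercalate_cons_prefix _ _ _ _).symm

-- ===== VERDICT (by name: the statement is the Claim_ definition above) =====
theorem fill_whitespace_in_quote_spec : Claim_equal_fill_whitespace_in_quote := by
  intro s _
  unfold Spec_fill_whitespace_in_quote fill_whitespace_in_quote fill_whitespace_in_quote_alt
  rw [foldl_fillStepA]
  rw [outA_eq_split]
  simp
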